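-- pv_equiv track=rewrite | github.com/gbowerman/vmsstools | vmssvmname/vmssvmname.py | hostname_to_vmid
-- ===== SOURCE A (Python) =====
-- def hostname_to_vmid(hostname):
--     # get last 6 characters and remove leading zeroes
--     hexatrig = hostname[-6:].lstrip('0').upper()
--     multiplier = 1
--     vmid = 0
--     # reverse string and process each char
--     for x in hexatrig[::-1]:
--         if x.isdigit():
--             vmid += int(x) * multiplier
--         else:
--             # convert letter to corresponding integer
--             vmid += (ord(x) - 55) * multiplier
--         multiplier *= 36
--     return vmid
-- ===== SOURCE B (Python) =====
-- def hostname_to_vmid(hostname):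
--     # Recursive Horner pass over the raw 6-char suffix: no lstrip, no upper,
--     # no reversal -- leading '0's contribute nothing, and case is handled in
--     # the per-char value function directly.
--     def val(c):
--         o = ord(c)
--         if 48 <= o <= 57:
--             return o - 48
--         if 97 <= o <= 122:
--             return o - 87
--         return o - 55
--
--     def go(chars, acc):
--         if not chars:
--             return acc
--         return go(chars[1:], acc * 36 + val(chars[0]))
--
--     return go(list(hostname[-6:]), 0)
-- ===== Notes on version B (the rewrite author's own statement) =====
-- stated objective: alternative
-- what changed: Replaces the lstrip/upper/reverse pipeline with a multiplier-pair loop by a recursive Horner pass over the raw 6-char suffix with a case-based per-char value function (leading zeros contribute nothing, lowercase handled arithmetically).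
import Mathlib
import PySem

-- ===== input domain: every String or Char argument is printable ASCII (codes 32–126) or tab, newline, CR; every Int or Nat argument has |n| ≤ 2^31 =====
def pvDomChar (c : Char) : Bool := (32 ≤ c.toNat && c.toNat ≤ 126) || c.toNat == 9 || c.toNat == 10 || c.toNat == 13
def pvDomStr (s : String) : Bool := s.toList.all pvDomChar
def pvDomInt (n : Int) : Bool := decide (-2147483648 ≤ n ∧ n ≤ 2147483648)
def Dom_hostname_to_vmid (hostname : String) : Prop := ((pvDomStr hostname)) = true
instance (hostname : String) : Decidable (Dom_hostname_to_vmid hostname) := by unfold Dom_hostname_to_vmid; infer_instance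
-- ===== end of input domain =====

-- B replaces A's lstrip/upper/reverse + multiplier loop by a recursive Horner pass over
-- the raw 6-char suffix with a case-based per-char value (alternative decomposition).


-- ===== PORT A =====
-- hostname[-6:].lstrip('0').upper(); lstrip('0') is exactly dropWhile (· == '0')
def hostname_to_vmid (hostname : String) : Int :=
  let hexatrig : List Char :=
    PySem.Chars.upper ((PySem.List.slice hostname.toList (some (-6)) none).dropWhile (fun c => c == '0'))
  -- hexatrig[::-1] = reverse (exact); int(x) for a digit char is its code - 48 (exact on ASCII)
  let st := hexatrig.reverse.foldl
    (fun (st : Int × Int) x =>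
      (if PySem.Chars.isdigit x then st.1 + ((x.toNat : Int) - 48) * st.2
       else st.1 + ((x.toNat : Int) - 55) * st.2,
       st.2 * 36)) (0, 1)
  st.1

-- ===== PORT B =====
-- Source B's val(c): ord comparisons 48..57 / 97..122
def pvVal (c : Char) : Int :=
  if 48 ≤ c.toNat ∧ c.toNat ≤ 57 then (c.toNat : Int) - 48
  else if 97 ≤ c.toNat ∧ c.toNat ≤ 122 then (c.toNat : Int) - 87
  else (c.toNat : Int) - 55

-- Source B's go(chars, acc): recursion on the list
def pvGo : List Char → Int → Int
  | [], acc => acc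
  | c :: t, acc => pvGo t (acc * 36 + pvVal c)

def hostname_to_vmid_alt (hostname : String) : Int :=
  pvGo (PySem.List.slice hostname.toList (some (-6)) none) 0

-- ===== PRECONDITION & SPEC =====
def Spec_hostname_to_vmid (hostname : String) (out : Int) : Prop := out = hostname_to_vmid_alt hostname
instance (hostname : String) (out : Int) : Decidable (Spec_hostname_to_vmid hostname out) := by unfold Spec_hostname_to_vmid; infer_instance

-- ===== CLAIM (what is proved, stated in full; the proofs are below) =====
def Claim_equal_hostname_to_vmid : Prop := ∀ (hostname : String), Dom_hostname_to_vmid hostname → Spec_hostname_to_vmid hostname (hostname_to_vmid hostname)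

-- ===== LEMMAS AND PROOFS =====

-- A's per-char value after upper()
def pvD (c : Char) : Int := if PySem.Chars.isdigit c then ((c.toNat : Int) - 48) else ((c.toNat : Int) - 55)

-- B's value agrees with A's value after uppercasing, for every char
lemma val_eq_D_upper (c : Char) : pvD (PySem.Chars.upperChar c) = pvVal c := by
  have hdig : ∀ d : Char, PySem.Chars.isdigit d = decide (48 ≤ d.toNat ∧ d.toNat ≤ 57) := by
    intro d
    unfold PySem.Chars.isdigit
    rw [Bool.eq_iff_iff]
    simp only [Bool.and_eq_true, decide_eq_true_eq]
    exact Iff.rfl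
  have hlow : PySem.Chars.islower c = decide (97 ≤ c.toNat ∧ c.toNat ≤ 122) := by
    unfold PySem.Chars.islower
    rw [Bool.eq_iff_iff]
    simp only [Bool.and_eq_true, decide_eq_true_eq]
    exact Iff.rfl
  unfold pvD pvVal PySem.Chars.upperChar
  by_cases hl : 97 ≤ c.toNat ∧ c.toNat ≤ 122
  · have hu : (if PySem.Chars.islower c = true then Char.ofNat (c.toNat - 32) else c)
        = Char.ofNat (c.toNat - 32) := by
      rw [hlow, if_pos (by simpa using hl)]
    have hof : (Char.ofNat (c.toNat - 32)).toNat = c.toNat - 32 := by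
      rw [Char.toNat_ofNat, if_pos (Or.inl (by omega))]
    rw [hu, hdig, hof]
    simp only [decide_eq_true_eq]
    split_ifs <;> omega
  · have hu : (if PySem.Chars.islower c = true then Char.ofNat (c.toNat - 32) else c) = c := by
      rw [hlow, if_neg (by simpa using hl)]
    rw [hu, hdig]
    simp only [decide_eq_true_eq]
    split_ifs <;> omega

-- pvGo is a left fold with pvVal
lemma pvGo_eq_foldl (l : List Char) (a : Int) :
    pvGo l a = l.foldl (fun v c => v * 36 + pvVal c) a := by
  induction l generalizing a with
  | nil => rfl
  | cons c t ih => simp [pvGo, ih]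

-- Horner accumulator shifts out of the fold
lemma horner_shift (l : List Char) (a : Int) :
    l.foldl (fun v c => v * 36 + pvVal c) a
      = a * 36 ^ l.length + l.foldl (fun v c => v * 36 + pvVal c) 0 := by
  induction l generalizing a with
  | nil => simp
  | cons c l ih =>
    simp only [List.foldl_cons, List.length_cons]
    rw [ih (a * 36 + pvVal c), show (0:Int) * 36 + pvVal c = pvVal c by ring, ih (pvVal c)]
    ring

-- dropping leading '0's does not change the Horner value (pvVal '0' = 0)
lemma horner_dropWhile (l : List Char) :
    (l.dropWhile (fun c => c == '0')).foldl (fun v c => v * 36 + pvVal c) 0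
      = l.foldl (fun v c => v * 36 + pvVal c) 0 := by
  induction l with
  | nil => rfl
  | cons c t ih =>
    by_cases h : c = '0'
    · subst h
      rw [List.dropWhile_cons_of_pos (by decide)]
      rw [ih, List.foldl_cons, show (0:Int) * 36 + pvVal '0' = 0 by decide]
    · rw [List.dropWhile_cons_of_neg (by simpa using h)]

-- A's reversed pair-state loop computes v + m * Horner over the uppercased list
lemma pair_loop_eq (l : List Char) (v m : Int) :
    (PySem.Chars.upper l).reverse.foldl
      (fun (st : Int × Int) x =>
        (if PySem.Chars.isdigit x then st.1 + ((x.toNat : Int) - 48) * st.2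
         else st.1 + ((x.toNat : Int) - 55) * st.2,
         st.2 * 36)) (v, m)
      = (v + m * l.foldl (fun v c => v * 36 + pvVal c) 0, m * 36 ^ l.length) := by
  induction l generalizing v m with
  | nil => simp [PySem.Chars.upper]
  | cons c l ih =>
    have hrev : (PySem.Chars.upper (c :: l)).reverse
        = (PySem.Chars.upper l).reverse ++ [PySem.Chars.upperChar c] := by
      simp [PySem.Chars.upper]
    rw [hrev, List.foldl_append, ih]
    simp only [List.foldl_cons, List.foldl_nil, List.length_cons]
    have hd := val_eq_D_upper c
    unfold pvD at hd
    rw [show (0:Int) * 36 + pvVal c = pvVal c by ring, horner_shift l (pvVal c)]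
    simp only [Prod.mk.injEq]
    split_ifs with h
    · rw [if_pos h] at hd
      exact ⟨by rw [← hd]; ring, by ring⟩
    · rw [if_neg h] at hd
      exact ⟨by rw [← hd]; ring, by ring⟩

-- ===== VERDICT (by name: the statement is the Claim_ definition above) =====
theorem hostname_to_vmid_spec : Claim_equal_hostname_to_vmid := by
  intro hostname _
  unfold Spec_hostname_to_vmid hostname_to_vmid hostname_to_vmid_alt
  simp only []
  rw [pair_loop_eq, pvGo_eq_foldl, horner_dropWhile]
  ring
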